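-- pv_equiv track=rewrite | github.com/siddhartharavva/ProjectPhase1 | 1Pratyush CRAG/verifier.py | _directional_cues
-- ===== SOURCE A (Python) =====
-- from typing import Dict, List, Sequence, Tuple
--
-- def _directional_cues(tokens_claim: List[str], tokens_sent: List[str]) -> Tuple[int, int]:
--     pairs = [
--         ("increase", "decrease"),
--         ("increases", "decreases"),
--         ("higher", "lower"),
--         ("high", "low"),
--         ("induces", "suppresses"),
--         ("activate", "inhibit"),
--         ("activation", "inhibition"),
--         ("improves", "worsens"),
--         ("accelerates", "delays"),
--         ("protects", "vulnerability"),
--     ]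
--
--     claim_set = set(tokens_claim)
--     sent_set = set(tokens_sent)
--     support = 0
--     contra = 0
--
--     for a, b in pairs:
--         claim_has_a = a in claim_set
--         claim_has_b = b in claim_set
--         sent_has_a = a in sent_set
--         sent_has_b = b in sent_set
--
--         if (claim_has_a and sent_has_a) or (claim_has_b and sent_has_b):
--             support += 1
--         if (claim_has_a and sent_has_b) or (claim_has_b and sent_has_a):
--             contra += 1
--
--     return support, contra
-- ===== SOURCE B (Python) =====
-- from typing import Dict, List, Sequence, Tuple
--
-- def _directional_cues(tokens_claim: List[str], tokens_sent: List[str]) -> Tuple[int, int]: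
--     pairs = [
--         ("increase", "decrease"),
--         ("increases", "decreases"),
--         ("higher", "lower"),
--         ("high", "low"),
--         ("induces", "suppresses"),
--         ("activate", "inhibit"),
--         ("activation", "inhibition"),
--         ("improves", "worsens"),
--         ("accelerates", "delays"),
--         ("protects", "vulnerability"),
--     ]
--     abit = {a: 1 << i for i, (a, _) in enumerate(pairs)}
--     bbit = {b: 1 << i for i, (_, b) in enumerate(pairs)}
--
--     def masks(tokens):
--         ma = 0
--         mb = 0
--         for tok in tokens:
--             ma |= abit.get(tok, 0)
--             mb |= bbit.get(tok, 0)
--         return ma, mb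
--
--     ca, cb = masks(tokens_claim)
--     sa, sb = masks(tokens_sent)
--     support = ((ca & sa) | (cb & sb)).bit_count()
--     contra = ((ca & sb) | (cb & sa)).bit_count()
--     return support, contra
-- ===== Notes on version B (the rewrite author's own statement) =====
-- stated objective: alternative
-- what changed: B replaces A's per-pair set probing by a bitmask algorithm: each cue word maps to a power-of-two bit, one pass per token list ORs the bits into two masks, and the support/contra counts are popcounts of bitwise AND/OR combinations of the four masks, with no per-pair loop at all.
import Mathlib
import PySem

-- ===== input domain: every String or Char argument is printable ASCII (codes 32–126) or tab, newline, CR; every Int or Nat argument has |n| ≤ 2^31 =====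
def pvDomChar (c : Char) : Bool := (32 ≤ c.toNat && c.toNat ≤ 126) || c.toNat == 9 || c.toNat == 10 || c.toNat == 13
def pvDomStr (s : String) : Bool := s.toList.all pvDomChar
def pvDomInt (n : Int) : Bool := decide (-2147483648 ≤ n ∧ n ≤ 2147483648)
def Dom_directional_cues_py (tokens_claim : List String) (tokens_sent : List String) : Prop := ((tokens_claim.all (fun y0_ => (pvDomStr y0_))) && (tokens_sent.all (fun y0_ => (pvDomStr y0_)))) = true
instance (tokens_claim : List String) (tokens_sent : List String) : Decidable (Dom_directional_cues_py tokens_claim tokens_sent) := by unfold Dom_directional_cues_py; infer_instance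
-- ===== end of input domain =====

-- B replaces A's per-pair probing of two token sets by a bitmask algorithm: each cue word
-- gets a power-of-two bit, one scan per token list ORs bits into two masks, and the two
-- counts are popcounts of bitwise combinations of the masks (alternative decomposition).

-- ===== PORT A =====
def pvPairsA : List (String × String) :=
  [("increase", "decrease"), ("increases", "decreases"), ("higher", "lower"),
   ("high", "low"), ("induces", "suppresses"), ("activate", "inhibit"),
   ("activation", "inhibition"), ("improves", "worsens"), ("accelerates", "delays"),
   ("protects", "vulnerability")]

def directional_cues_py (tokens_claim : List String) (tokens_sent : List String) : Int × Int :=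
  let claim_set : PySem.Set String := PySem.Set.ofList tokens_claim
  let sent_set : PySem.Set String := PySem.Set.ofList tokens_sent
  pvPairsA.foldl (fun (acc : Int × Int) ab =>
    let claim_has_a := PySem.Set.contains claim_set ab.1
    let claim_has_b := PySem.Set.contains claim_set ab.2
    let sent_has_a := PySem.Set.contains sent_set ab.1
    let sent_has_b := PySem.Set.contains sent_set ab.2
    let support := if (claim_has_a && sent_has_a) || (claim_has_b && sent_has_b) then acc.1 + 1 else acc.1
    let contra := if (claim_has_a && sent_has_b) || (claim_has_b && sent_has_a) then acc.2 + 1 else acc.2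
    (support, contra)) (0, 0)

-- ===== PORT B =====
def pvPairsB : List (String × String) :=
  [("increase", "decrease"), ("increases", "decreases"), ("higher", "lower"),
   ("high", "low"), ("induces", "suppresses"), ("activate", "inhibit"),
   ("activation", "inhibition"), ("improves", "worsens"), ("accelerates", "delays"),
   ("protects", "vulnerability")]

-- abit = {a: 1 << i for i, (a, _) in enumerate(pairs)}; the enumerate indices are ≥ 0,
-- so Python's '1 << i' is ported exactly as '(1 : Int) <<< i.toNat'.
def pvABit : PySem.Dict String Int :=
  (PySem.List.enumerate pvPairsB).foldl
    (fun d iab => d.insert iab.2.1 ((1 : Int) <<< iab.1.toNat)) PySem.Dict.empty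

def pvBBit : PySem.Dict String Int :=
  (PySem.List.enumerate pvPairsB).foldl
    (fun d iab => d.insert iab.2.2 ((1 : Int) <<< iab.1.toNat)) PySem.Dict.empty

def pvMasks (tokens : List String) : Int × Int :=
  tokens.foldl (fun m tok =>
    (PySem.Int.bor m.1 (PySem.Dict.getD pvABit tok 0),
     PySem.Int.bor m.2 (PySem.Dict.getD pvBBit tok 0))) (0, 0)

def directional_cues_py_alt (tokens_claim : List String) (tokens_sent : List String) : Int × Int :=
  let cm := pvMasks tokens_claim
  let sm := pvMasks tokens_sent
  let support := PySem.Int.bitCount (PySem.Int.bor (PySem.Int.band cm.1 sm.1) (PySem.Int.band cm.2 sm.2))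
  let contra := PySem.Int.bitCount (PySem.Int.bor (PySem.Int.band cm.1 sm.2) (PySem.Int.band cm.2 sm.1))
  ((support : Int), (contra : Int))

-- ===== PRECONDITION & SPEC =====
def Spec_directional_cues_py (tokens_claim : List String) (tokens_sent : List String) (out : Int × Int) : Prop := out = directional_cues_py_alt tokens_claim tokens_sent
instance (tokens_claim : List String) (tokens_sent : List String) (out : Int × Int) : Decidable (Spec_directional_cues_py tokens_claim tokens_sent out) := by unfold Spec_directional_cues_py; infer_instance

-- ===== CLAIM (what is proved, stated in full; the proofs are below) =====
def Claim_equal_directional_cues_py : Prop := ∀ (tokens_claim : List String) (tokens_sent : List String), Dom_directional_cues_py tokens_claim tokens_sent → Spec_directional_cues_py tokens_claim tokens_sent (directional_cues_py tokens_claim tokens_sent)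

-- ===== LEMMAS AND PROOFS =====

-- Nat-valued versions of the two bit dicts, as plain if-chains over the key.
def pvANat (t : String) : Nat :=
  if "increase" == t then 1 else if "increases" == t then 2 else if "higher" == t then 4 else
  if "high" == t then 8 else if "induces" == t then 16 else if "activate" == t then 32 else
  if "activation" == t then 64 else if "improves" == t then 128 else if "accelerates" == t then 256 else
  if "protects" == t then 512 else 0

def pvBNat (t : String) : Nat :=
  if "decrease" == t then 1 else if "decreases" == t then 2 else if "lower" == t then 4 else
  if "low" == t then 8 else if "suppresses" == t then 16 else if "inhibit" == t then 32 else
  if "inhibition" == t then 64 else if "worsens" == t then 128 else if "delays" == t then 256 else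
  if "vulnerability" == t then 512 else 0

-- The two token-scan masks, computed over Nat.
def pvNatA (ts : List String) : Nat := ts.foldl (fun m t => m ||| pvANat t) 0
def pvNatB (ts : List String) : Nat := ts.foldl (fun m t => m ||| pvBNat t) 0

set_option maxHeartbeats 1000000 in
theorem pvABit_eq : pvABit = PySem.Dict.mk [("increase", 1), ("increases", 2), ("higher", 4), ("high", 8), ("induces", 16), ("activate", 32), ("activation", 64), ("improves", 128), ("accelerates", 256), ("protects", 512)] := by rfl

set_option maxHeartbeats 1000000 in
theorem pvBBit_eq : pvBBit = PySem.Dict.mk [("decrease", 1), ("decreases", 2), ("lower", 4), ("low", 8), ("suppresses", 16), ("inhibit", 32), ("inhibition", 64), ("worsens", 128), ("delays", 256), ("vulnerability", 512)] := by rfl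

set_option maxHeartbeats 1000000 in
theorem pvABit_getD (t : String) : PySem.Dict.getD pvABit t 0 = ((pvANat t : Nat) : Int) := by
  rw [pvABit_eq]
  simp only [PySem.Dict.getD_eq_get?_getD, PySem.Dict.get?_mk_cons, pvANat]
  split_ifs <;> simp_all [PySem.Dict.get?]

set_option maxHeartbeats 1000000 in
theorem pvBBit_getD (t : String) : PySem.Dict.getD pvBBit t 0 = ((pvBNat t : Nat) : Int) := by
  rw [pvBBit_eq]
  simp only [PySem.Dict.getD_eq_get?_getD, PySem.Dict.get?_mk_cons, pvBNat]
  split_ifs <;> simp_all [PySem.Dict.get?]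

-- B's Int mask fold is the Nat mask fold, cast.
theorem pvMasks_fold : ∀ (ts : List String) (x y : Nat),
    ts.foldl (fun m tok =>
      (PySem.Int.bor m.1 (PySem.Dict.getD pvABit tok 0),
       PySem.Int.bor m.2 (PySem.Dict.getD pvBBit tok 0))) ((x : Int), (y : Int))
    = (((ts.foldl (fun m t => m ||| pvANat t) x : Nat) : Int), ((ts.foldl (fun m t => m ||| pvBNat t) y : Nat) : Int)) := by
  intro ts
  induction ts with
  | nil => intro x y; rfl
  | cons t ts ih =>
    intro x y
    simp only [List.foldl_cons]
    rw [pvABit_getD t, pvBBit_getD t, PySem.Int.bor_natCast, PySem.Int.bor_natCast]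
    exact ih _ _

theorem pvMasks_spec (ts : List String) : pvMasks ts = (((pvNatA ts : Nat) : Int), ((pvNatB ts : Nat) : Int)) := by
  rw [pvMasks, pvNatA, pvNatB, show ((0, 0) : Int × Int) = (((0 : Nat) : Int), ((0 : Nat) : Int)) by norm_num]
  exact pvMasks_fold ts 0 0

-- A bit of the OR-fold mask is an 'any' over the tokens.
theorem pv_or_testBit (g : String → Nat) : ∀ (ts : List String) (x : Nat) (k : Nat),
    (ts.foldl (fun m t => m ||| g t) x).testBit k = (x.testBit k || ts.any (fun t => (g t).testBit k)) := by
  intro ts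
  induction ts with
  | nil => simp
  | cons t ts ih => intro x k; simp [List.foldl_cons, ih, Nat.testBit_or, Bool.or_assoc]

theorem pv_or_lt (g : String → Nat) (hg : ∀ t, g t < 2 ^ 10) : ∀ (ts : List String) (x : Nat), x < 2 ^ 10 →
    (ts.foldl (fun m t => m ||| g t) x) < 2 ^ 10 := by
  intro ts
  induction ts with
  | nil => exact fun x hx => hx
  | cons t ts ih => intro x hx; exact ih _ (Nat.or_lt_two_pow hx (hg t))

theorem pvANat_lt : ∀ t, pvANat t < 2 ^ 10 := by
  intro t; unfold pvANat; split_ifs <;> norm_num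

theorem pvBNat_lt : ∀ t, pvBNat t < 2 ^ 10 := by
  intro t; unfold pvBNat; split_ifs <;> norm_num

theorem pvNatA_lt (ts : List String) : pvNatA ts < 2 ^ 10 := pv_or_lt _ pvANat_lt ts 0 (by norm_num)
theorem pvNatB_lt (ts : List String) : pvNatB ts < 2 ^ 10 := pv_or_lt _ pvBNat_lt ts 0 (by norm_num)

theorem pv_any_beq (ts : List String) (w : String) : (ts.any fun t => w == t) = ts.contains w := by
  induction ts with
  | nil => rfl
  | cons t ts ih => by_cases h : w = t <;> simp [ih, h, BEq.symm_false]

-- popcount of a 10-bit number is the sum of its bits.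
set_option maxHeartbeats 2000000 in
set_option maxRecDepth 8192 in
theorem pvBitCount_sum : ∀ m : Nat, m < 1024 → PySem.Int.bitCount (m : Int) = ((m.testBit 0).toNat + (m.testBit 1).toNat + (m.testBit 2).toNat + (m.testBit 3).toNat + (m.testBit 4).toNat + (m.testBit 5).toNat + (m.testBit 6).toNat + (m.testBit 7).toNat + (m.testBit 8).toNat + (m.testBit 9).toNat) := by decide

-- bit i of a cue-word bit function: presence of that cue word.
theorem pvANat_tb : ∀ t, ((pvANat t).testBit 0 = ("increase" == t)) ∧ ((pvANat t).testBit 1 = ("increases" == t)) ∧ ((pvANat t).testBit 2 = ("higher" == t)) ∧ ((pvANat t).testBit 3 = ("high" == t)) ∧ ((pvANat t).testBit 4 = ("induces" == t)) ∧ ((pvANat t).testBit 5 = ("activate" == t)) ∧ ((pvANat t).testBit 6 = ("activation" == t)) ∧ ((pvANat t).testBit 7 = ("improves" == t)) ∧ ((pvANat t).testBit 8 = ("accelerates" == t)) ∧ ((pvANat t).testBit 9 = ("protects" == t)) := by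
  intro t; unfold pvANat; split_ifs <;> simp_all [beq_iff_eq] <;> (try subst_vars) <;> decide

theorem pvBNat_tb : ∀ t, ((pvBNat t).testBit 0 = ("decrease" == t)) ∧ ((pvBNat t).testBit 1 = ("decreases" == t)) ∧ ((pvBNat t).testBit 2 = ("lower" == t)) ∧ ((pvBNat t).testBit 3 = ("low" == t)) ∧ ((pvBNat t).testBit 4 = ("suppresses" == t)) ∧ ((pvBNat t).testBit 5 = ("inhibit" == t)) ∧ ((pvBNat t).testBit 6 = ("inhibition" == t)) ∧ ((pvBNat t).testBit 7 = ("worsens" == t)) ∧ ((pvBNat t).testBit 8 = ("delays" == t)) ∧ ((pvBNat t).testBit 9 = ("vulnerability" == t)) := by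
  intro t; unfold pvBNat; split_ifs <;> simp_all [beq_iff_eq] <;> (try subst_vars) <;> decide

-- bit i of a mask is containment of the cue word in the token list.
theorem pvNatA_tb (ts : List String) (i : Nat) (w : String) (hw : ∀ t, (pvANat t).testBit i = (w == t)) :
    (pvNatA ts).testBit i = ts.contains w := by
  rw [pvNatA, pv_or_testBit]
  simp only [Nat.zero_testBit, Bool.false_or]
  rw [show (fun t => (pvANat t).testBit i) = (fun t => w == t) from funext hw, pv_any_beq]

theorem pvNatB_tb (ts : List String) (i : Nat) (w : String) (hw : ∀ t, (pvBNat t).testBit i = (w == t)) :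
    (pvNatB ts).testBit i = ts.contains w := by
  rw [pvNatB, pv_or_testBit]
  simp only [Nat.zero_testBit, Bool.false_or]
  rw [show (fun t => (pvBNat t).testBit i) = (fun t => w == t) from funext hw, pv_any_beq]

-- A's set membership is list containment.
theorem pv_set_contains (l : List String) (w : String) :
    PySem.Set.contains (PySem.Set.ofList l) w = l.contains w := by
  simp [PySem.Set.mem_ofList, List.contains_eq_mem]

theorem pv_if_toNat (b : Bool) (x : Int) : (if b then x + 1 else x) = x + (b.toNat : Int) := by
  cases b <;> simp

theorem pv_comb_lt (a b c d : Nat) (ha : a < 2 ^ 10) (hc : c < 2 ^ 10) :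
    ((a &&& b) ||| (c &&& d)) < 1024 := by
  have h1 : a &&& b < 2 ^ 10 := lt_of_le_of_lt Nat.and_le_left ha
  have h2 : c &&& d < 2 ^ 10 := lt_of_le_of_lt Nat.and_le_left hc
  simpa using Nat.or_lt_two_pow h1 h2

-- ===== VERDICT (by name: the statement is the Claim_ definition above) =====
set_option maxHeartbeats 2000000 in
theorem directional_cues_py_spec : Claim_equal_directional_cues_py := by
  intro tc ts _
  show directional_cues_py tc ts = directional_cues_py_alt tc ts
  have A0 := fun l => pvNatA_tb l 0 "increase" (fun t => (pvANat_tb t).1)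
  have A1 := fun l => pvNatA_tb l 1 "increases" (fun t => (pvANat_tb t).2.1)
  have A2 := fun l => pvNatA_tb l 2 "higher" (fun t => (pvANat_tb t).2.2.1)
  have A3 := fun l => pvNatA_tb l 3 "high" (fun t => (pvANat_tb t).2.2.2.1)
  have A4 := fun l => pvNatA_tb l 4 "induces" (fun t => (pvANat_tb t).2.2.2.2.1)
  have A5 := fun l => pvNatA_tb l 5 "activate" (fun t => (pvANat_tb t).2.2.2.2.2.1)
  have A6 := fun l => pvNatA_tb l 6 "activation" (fun t => (pvANat_tb t).2.2.2.2.2.2.1)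
  have A7 := fun l => pvNatA_tb l 7 "improves" (fun t => (pvANat_tb t).2.2.2.2.2.2.2.1)
  have A8 := fun l => pvNatA_tb l 8 "accelerates" (fun t => (pvANat_tb t).2.2.2.2.2.2.2.2.1)
  have A9 := fun l => pvNatA_tb l 9 "protects" (fun t => (pvANat_tb t).2.2.2.2.2.2.2.2.2)
  have B0 := fun l => pvNatB_tb l 0 "decrease" (fun t => (pvBNat_tb t).1)
  have B1 := fun l => pvNatB_tb l 1 "decreases" (fun t => (pvBNat_tb t).2.1)
  have B2 := fun l => pvNatB_tb l 2 "lower" (fun t => (pvBNat_tb t).2.2.1)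
  have B3 := fun l => pvNatB_tb l 3 "low" (fun t => (pvBNat_tb t).2.2.2.1)
  have B4 := fun l => pvNatB_tb l 4 "suppresses" (fun t => (pvBNat_tb t).2.2.2.2.1)
  have B5 := fun l => pvNatB_tb l 5 "inhibit" (fun t => (pvBNat_tb t).2.2.2.2.2.1)
  have B6 := fun l => pvNatB_tb l 6 "inhibition" (fun t => (pvBNat_tb t).2.2.2.2.2.2.1)
  have B7 := fun l => pvNatB_tb l 7 "worsens" (fun t => (pvBNat_tb t).2.2.2.2.2.2.2.1)
  have B8 := fun l => pvNatB_tb l 8 "delays" (fun t => (pvBNat_tb t).2.2.2.2.2.2.2.2.1)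
  have B9 := fun l => pvNatB_tb l 9 "vulnerability" (fun t => (pvBNat_tb t).2.2.2.2.2.2.2.2.2)
  rw [directional_cues_py_alt]
  simp only [pvMasks_spec, PySem.Int.band_natCast, PySem.Int.bor_natCast]
  rw [pvBitCount_sum _ (pv_comb_lt _ _ _ _ (pvNatA_lt tc) (pvNatB_lt tc)),
      pvBitCount_sum _ (pv_comb_lt _ _ _ _ (pvNatA_lt tc) (pvNatB_lt tc))]
  simp only [Nat.testBit_or, Nat.testBit_and, A0, A1, A2, A3, A4, A5, A6, A7, A8, A9,
    B0, B1, B2, B3, B4, B5, B6, B7, B8, B9]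
  rw [directional_cues_py]
  simp only [pvPairsA, List.foldl_cons, List.foldl_nil, pv_set_contains, pv_if_toNat]
  simp only [Prod.mk.injEq]
  constructor <;> push_cast <;> ring
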